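-- pv_equiv track=rewrite | github.com/k0rd/bakerrrr | game/service_runtime.py | _casino_three_card_straight_high
-- ===== SOURCE A (Python) =====
-- def _casino_three_card_straight_high(ranks):
--     unique = sorted({int(rank) for rank in list(ranks or ()) if int(rank) > 0})
--     if len(unique) != 3:
--         return 0
--     if unique == [2, 3, 14]:
--         return 3
--     if unique[0] + 1 == unique[1] and unique[1] + 1 == unique[2]:
--         return unique[2]
--     return 0
-- ===== SOURCE B (Python) =====
-- def _casino_three_card_straight_high(ranks):
--     # One pass: keep at most 3 distinct positive ranks in a sorted accumulator;
--     # stop early as soon as a 4th distinct positive rank appears.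
--     acc = []
--     many = False
--     for rank in (ranks or ()):
--         v = int(rank)
--         if v <= 0 or v in acc:
--             continue
--         if len(acc) == 3:
--             many = True
--             break
--         i = 0
--         while i < len(acc) and acc[i] < v:
--             i += 1
--         acc.insert(i, v)
--     if many or len(acc) != 3:
--         return 0
--     a, b, c = acc
--     if (a, b, c) == (2, 3, 14):
--         return 3
--     return c if c - a == 2 else 0
-- ===== Notes on version B (the rewrite author's own statement) =====
-- stated objective: faster
-- what changed: Replaces A's build-a-set-then-sort pipeline by a single pass that keeps at most 3 distinct positive ranks in a small sorted accumulator and exits early as soon as a 4th distinct value appears; the final test is a tuple check for the Ace-low triple and a span test c-a==2 instead of the pairwise adjacency chain.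
import Mathlib
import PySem

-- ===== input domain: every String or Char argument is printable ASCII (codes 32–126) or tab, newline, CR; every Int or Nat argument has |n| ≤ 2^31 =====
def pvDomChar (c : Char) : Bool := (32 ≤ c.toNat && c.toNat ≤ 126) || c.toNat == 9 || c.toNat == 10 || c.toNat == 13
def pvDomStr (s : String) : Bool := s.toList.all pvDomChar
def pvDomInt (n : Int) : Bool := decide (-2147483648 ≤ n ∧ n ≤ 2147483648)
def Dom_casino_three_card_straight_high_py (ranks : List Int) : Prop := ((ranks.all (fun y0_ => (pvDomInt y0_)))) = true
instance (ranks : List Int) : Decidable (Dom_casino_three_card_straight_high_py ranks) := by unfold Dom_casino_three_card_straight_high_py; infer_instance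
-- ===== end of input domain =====

-- B replaces A's build-set-then-sort pipeline by a single pass keeping at most 3 distinct
-- positive ranks in a small sorted accumulator with early exit on the 4th (objective: alternative).

-- ===== PORT A =====
-- A's local `unique = sorted({int(r) for r in ranks if int(r) > 0})`
def pvUniqueA (ranks : List Int) : List Int :=
  PySem.List.sorted (PySem.Set.ofList (ranks.filter (fun r => decide (0 < r)))) (fun x => x) false

def casino_three_card_straight_high_py (ranks : List Int) : Int :=
  if (pvUniqueA ranks).length ≠ 3 then 0
  else if pvUniqueA ranks = [2, 3, 14] then 3
  else match pvUniqueA ranks with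
    | [a, b, c] => if a + 1 = b ∧ b + 1 = c then c else 0
    | _ => 0  -- unreachable: length is 3 here

-- ===== PORT B =====
-- the insertion (the index-scan `while` + `acc.insert(i, v)` of Source B, as structural recursion)
def pvInsSorted (v : Int) : List Int → List Int
  | [] => [v]
  | x :: t => if x < v then x :: pvInsSorted v t else v :: x :: t

-- the `for rank in ranks` loop of Source B over the state (acc, many); `break` = returning with true
def pvAltLoop : List Int → List Int → List Int × Bool
  | [], acc => (acc, false)
  | r :: rs, acc =>
    if r ≤ 0 || acc.contains r then pvAltLoop rs acc
    else if acc.length = 3 then (acc, true)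
    else pvAltLoop rs (pvInsSorted r acc)

-- the final unpack `a, b, c = acc` + checks of Source B
def pvFinal (acc : List Int) : Int :=
  let a := acc.getD 0 0
  let b := acc.getD 1 0
  let c := acc.getD 2 0   -- defaults unreachable: called only when length is 3
  if a = 2 ∧ b = 3 ∧ c = 14 then 3 else if c - a = 2 then c else 0

def casino_three_card_straight_high_py_alt (ranks : List Int) : Int :=
  if (pvAltLoop ranks []).2 || (pvAltLoop ranks []).1.length ≠ 3 then 0
  else pvFinal (pvAltLoop ranks []).1

-- ===== PRECONDITION & SPEC =====
def Spec_casino_three_card_straight_high_py (ranks : List Int) (out : Int) : Prop := out = casino_three_card_straight_high_py_alt ranks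
instance (ranks : List Int) (out : Int) : Decidable (Spec_casino_three_card_straight_high_py ranks out) := by unfold Spec_casino_three_card_straight_high_py; infer_instance

-- ===== CLAIM (what is proved, stated in full; the proofs are below) =====
def Claim_equal_casino_three_card_straight_high_py : Prop := ∀ (ranks : List Int), Dom_casino_three_card_straight_high_py ranks → Spec_casino_three_card_straight_high_py ranks (casino_three_card_straight_high_py ranks)

-- ===== LEMMAS AND PROOFS =====

theorem pvInsSorted_mem (v x : Int) (acc : List Int) :
    x ∈ pvInsSorted v acc ↔ x = v ∨ x ∈ acc := by
  induction acc with
  | nil => simp [pvInsSorted]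
  | cons y t ih =>
    simp only [pvInsSorted]
    split_ifs
    · simp only [List.mem_cons, ih]; tauto
    · simp only [List.mem_cons]

theorem pvInsSorted_pairwise (v : Int) (acc : List Int)
    (h : acc.Pairwise (· < ·)) (hv : v ∉ acc) :
    (pvInsSorted v acc).Pairwise (· < ·) := by
  induction acc with
  | nil => simp [pvInsSorted]
  | cons y t ih =>
    rw [List.pairwise_cons] at h
    simp only [pvInsSorted]
    split_ifs with hy
    · rw [List.pairwise_cons]
      refine ⟨?_, ih h.2 (by simp at hv; tauto)⟩
      intro z hz
      rw [pvInsSorted_mem] at hz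
      rcases hz with rfl | hz
      · exact hy
      · exact h.1 z hz
    · rw [List.pairwise_cons]
      constructor
      · intro z hz
        simp at hz hv
        rcases hz with rfl | hz
        · omega
        · have := h.1 z hz; omega
      · exact List.pairwise_cons.mpr h
  
theorem pvInsSorted_length (v : Int) (acc : List Int) :
    (pvInsSorted v acc).length = acc.length + 1 := by
  induction acc with
  | nil => simp [pvInsSorted]
  | cons y t ih => simp only [pvInsSorted]; split_ifs <;> simp [ih]

/-- Invariant for the loop of B. -/
theorem pvAltLoop_inv (xs : List Int) : ∀ acc : List Int, acc.Pairwise (· < ·) →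
    ((pvAltLoop xs acc).2 = false →
      (pvAltLoop xs acc).1.Pairwise (· < ·) ∧
      ∀ x, x ∈ (pvAltLoop xs acc).1 ↔ x ∈ acc ∨ (x ∈ xs ∧ 0 < x)) ∧
    ((pvAltLoop xs acc).2 = true →
      ∃ l : List Int, l.length = 4 ∧ l.Pairwise (· < ·) ∧
        ∀ x ∈ l, x ∈ acc ∨ (x ∈ xs ∧ 0 < x)) := by
  induction xs with
  | nil =>
    intro acc hacc
    refine ⟨fun _ => ⟨hacc, by simp [pvAltLoop]⟩, fun h => by simp [pvAltLoop] at h⟩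
  | cons r rs ih =>
    intro acc hacc
    simp only [pvAltLoop]
    split_ifs with h1 h2
    · -- skipped: r ≤ 0 or already in acc
      simp only [Bool.or_eq_true, decide_eq_true_eq, List.contains_iff_mem] at h1
      obtain ⟨hA, hB⟩ := ih acc hacc
      refine ⟨fun hf => ⟨(hA hf).1, ?_⟩, fun ht => ?_⟩
      · intro x
        rw [(hA hf).2 x]
        constructor
        · rintro (hx | ⟨hx, hpos⟩)
          · exact Or.inl hx
          · exact Or.inr ⟨List.mem_cons_of_mem _ hx, hpos⟩
        · rintro (hx | ⟨hx, hpos⟩)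
          · exact Or.inl hx
          · rcases List.mem_cons.mp hx with rfl | hx
            · rcases h1 with h1 | h1
              · omega
              · exact Or.inl h1
            · exact Or.inr ⟨hx, hpos⟩
      · obtain ⟨l, hl1, hl2, hl3⟩ := hB ht
        exact ⟨l, hl1, hl2, fun x hx => by
          rcases hl3 x hx with hx' | ⟨hx', hpos⟩
          · exact Or.inl hx'
          · exact Or.inr ⟨List.mem_cons_of_mem _ hx', hpos⟩⟩
    · -- break: 4th distinct positive found
      simp only [Bool.or_eq_true, decide_eq_true_eq, List.contains_iff_mem, not_or] at h1
      refine ⟨fun hf => by simp at hf, fun _ => ?_⟩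
      refine ⟨pvInsSorted r acc, by rw [pvInsSorted_length, h2],
        pvInsSorted_pairwise r acc hacc h1.2, ?_⟩
      intro x hx
      rw [pvInsSorted_mem] at hx
      rcases hx with rfl | hx
      · exact Or.inr ⟨List.mem_cons_self .., by omega⟩
      · exact Or.inl hx
    · -- inserted
      simp only [Bool.or_eq_true, decide_eq_true_eq, List.contains_iff_mem, not_or] at h1
      have hacc' := pvInsSorted_pairwise r acc hacc h1.2
      obtain ⟨hA, hB⟩ := ih (pvInsSorted r acc) hacc'
      refine ⟨fun hf => ⟨(hA hf).1, ?_⟩, fun ht => ?_⟩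
      · intro x
        rw [(hA hf).2 x, pvInsSorted_mem]
        constructor
        · rintro ((rfl | hx) | ⟨hx, hpos⟩)
          · exact Or.inr ⟨List.mem_cons_self .., by omega⟩
          · exact Or.inl hx
          · exact Or.inr ⟨List.mem_cons_of_mem _ hx, hpos⟩
        · rintro (hx | ⟨hx, hpos⟩)
          · exact Or.inl (Or.inr hx)
          · rcases List.mem_cons.mp hx with rfl | hx
            · exact Or.inl (Or.inl rfl)
            · exact Or.inr ⟨hx, hpos⟩
      · obtain ⟨l, hl1, hl2, hl3⟩ := hB ht
        refine ⟨l, hl1, hl2, fun x hx => ?_⟩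
        rcases hl3 x hx with hx' | ⟨hx', hpos⟩
        · rw [pvInsSorted_mem] at hx'
          rcases hx' with rfl | hx'
          · exact Or.inr ⟨List.mem_cons_self .., by omega⟩
          · exact Or.inl hx'
        · exact Or.inr ⟨List.mem_cons_of_mem _ hx', hpos⟩

-- ===== VERDICT (by name: the statement is the Claim_ definition above) =====
theorem casino_three_card_straight_high_py_spec : Claim_equal_casino_three_card_straight_high_py := by
  intro ranks _
  unfold Spec_casino_three_card_straight_high_py
  unfold casino_three_card_straight_high_py casino_three_card_straight_high_py_alt
  set s : PySem.Set Int := PySem.Set.ofList (ranks.filter (fun r => decide (0 < r))) with hs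
  set u := PySem.List.sorted s (fun x => x) false with hu
  have hmemS : ∀ x : Int, x ∈ s ↔ x ∈ ranks ∧ 0 < x := by
    intro x
    rw [hs, PySem.Set.mem_ofList, List.mem_filter]
    simp
  have hUA : pvUniqueA ranks = u := rfl
  have hperm : u.Perm s := PySem.List.sorted_perm ..
  have hupw : u.Pairwise (· < ·) := by rw [hu, hs]; exact PySem.List.sorted_ofList_pairwise_lt ..
  have hund : u.Nodup := hupw.imp (fun h => ne_of_lt h)
  have humem : ∀ x : Int, x ∈ u ↔ x ∈ ranks ∧ 0 < x := fun x => by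
    rw [hperm.mem_iff]; exact hmemS x
  obtain ⟨hA, hB⟩ := pvAltLoop_inv ranks [] (by simp)
  cases hfl : (pvAltLoop ranks []).2 with
  | true =>
    -- B returns 0; A's set has ≥ 4 distinct members so A returns 0 too
    obtain ⟨l, hl1, hl2, hl3⟩ := hB hfl
    have hlnd : l.Nodup := hl2.imp (fun h => ne_of_lt h)
    have hsub : l ⊆ u := by
      intro x hx
      rcases hl3 x hx with hx' | ⟨hx', hpos⟩
      · simp at hx'
      · exact (humem x).mpr ⟨hx', hpos⟩
    have hlen : l.length ≤ u.length := (hlnd.subperm hsub).length_le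
    rw [hUA, if_pos (by omega : u.length ≠ 3)]
    simp
  | false =>
    obtain ⟨hpw, hmem⟩ := hA hfl
    have hnd : (pvAltLoop ranks []).1.Nodup := hpw.imp (fun h => ne_of_lt h)
    have hsnd : s.Nodup := PySem.Set.nodup_ofList ..
    have hmem' : ∀ x : Int, x ∈ (pvAltLoop ranks []).1 ↔ x ∈ s := by
      intro x; rw [hmem x, hmemS x]; simp
    have hpermAcc : (pvAltLoop ranks []).1.Perm s :=
      (List.perm_ext_iff_of_nodup hnd hsnd).mpr hmem'
    have hueq : u = (pvAltLoop ranks []).1 :=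
      PySem.List.sorted_eq_of_perm_of_pairwise_lt _ _ _ hpermAcc hpw
    rw [hUA, ← hueq]
    by_cases h3 : u.length = 3
    · obtain ⟨a, b, c, hl⟩ := List.length_eq_three.mp h3
      have hab : a < b := by
        have h := hupw; rw [hl] at h; simp [List.pairwise_cons] at h; omega
      have hbc : b < c := by
        have h := hupw; rw [hl] at h; simp [List.pairwise_cons] at h; omega
      rw [hl]
      simp only [pvFinal, List.getD_cons_zero, List.getD_cons_succ, List.length_cons, List.length_nil, List.cons.injEq, and_true, ne_eq,
        Bool.false_or, decide_eq_true_eq]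
      split_ifs <;> omega
    · rw [if_pos h3, if_pos (by simpa using h3)]
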